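-- pv_equiv track=rewrite | github.com/Dheeraj0053/Advanced-Python-Practice-Questions | Q9.py | moveDups
-- ===== SOURCE A (Python) =====
-- def moveDups(s):
--     seen = set()
--     first_occurrence = []
--     duplicates = []
--     for char in s:
--         if char not in seen:
--             seen.add(char)
--             first_occurrence.append(char)
--         else:
--             duplicates.append(char)
--     return ''.join(first_occurrence) + ('_' + ''.join(duplicates) if duplicates else '')
-- ===== SOURCE B (Python) =====
-- def moveDups(s):
--     firsts = "".join(dict.fromkeys(s))
--     dups = "".join(c for i, c in enumerate(s) if s.index(c) != i)
--     return firsts + "_" + dups if dups else firsts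
-- ===== Notes on version B (the rewrite author's own statement) =====
-- stated objective: simpler
-- what changed: Replaces A's single stateful loop maintaining a seen-set and two accumulator lists by two declarative passes: dict.fromkeys for the ordered first occurrences and an enumerate/first-index comparison (s.index(c) != i) for the duplicates.
import Mathlib
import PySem

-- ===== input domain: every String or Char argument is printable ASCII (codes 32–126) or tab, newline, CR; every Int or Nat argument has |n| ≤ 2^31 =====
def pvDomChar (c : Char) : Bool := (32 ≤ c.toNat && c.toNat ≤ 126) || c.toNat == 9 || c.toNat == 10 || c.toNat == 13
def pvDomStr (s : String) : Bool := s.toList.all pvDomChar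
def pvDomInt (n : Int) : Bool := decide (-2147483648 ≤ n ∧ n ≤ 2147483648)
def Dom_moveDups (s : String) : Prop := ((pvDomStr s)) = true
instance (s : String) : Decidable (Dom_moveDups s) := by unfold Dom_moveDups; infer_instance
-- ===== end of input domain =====

-- B replaces A's single seen-set loop by two declarative passes: ordered dedup via
-- dict.fromkeys for the firsts, and an enumerate/first-index comparison for the
-- duplicates (objective: simpler).

-- ===== PORT A =====
-- single pass with a seen-set and two accumulator lists, as in the Python
def moveDupsLoop (l : List Char) : PySem.Set Char × List Char × List Char :=
  l.foldl (fun st c =>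
    if !(PySem.Set.contains st.1 c) then
      (PySem.Set.add st.1 c, st.2.1 ++ [c], st.2.2)
    else
      (st.1, st.2.1, st.2.2 ++ [c])) ([], [], [])

def moveDups (s : String) : String :=
  let r := moveDupsLoop s.toList
  String.ofList (r.2.1 ++ (if r.2.2.isEmpty then [] else '_' :: r.2.2))

-- ===== PORT B =====
-- duplicates = characters whose position is not the first index of that character
def dupsB (l : List Char) : List Char :=
  ((PySem.List.enumerate l).filter
      (fun p => decide ((PySem.List.index? l p.2).map (fun n => (n : Int)) ≠ some p.1))).map (·.2)

def moveDups_alt (s : String) : String :=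
  let firsts := PySem.List.dedup s.toList
  let dups := dupsB s.toList
  if dups.isEmpty then String.ofList firsts else String.ofList (firsts ++ '_' :: dups)

-- ===== PRECONDITION & SPEC =====
def Spec_moveDups (s : String) (out : String) : Prop := out = moveDups_alt s
instance (s : String) (out : String) : Decidable (Spec_moveDups s out) := by unfold Spec_moveDups; infer_instance

-- ===== CLAIM (what is proved, stated in full; the proofs are below) =====
def Claim_equal_moveDups : Prop := ∀ (s : String), Dom_moveDups s → Spec_moveDups s (moveDups s)

-- ===== LEMMAS AND PROOFS =====

-- appending one character extends dupsB by that character iff it occurred before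
lemma dupsB_append (l : List Char) (c : Char) :
    dupsB (l ++ [c]) = dupsB l ++ (if c ∈ l then [c] else []) := by
  unfold dupsB
  rw [PySem.List.enumerate_append, List.filter_append, List.map_append]
  congr 1
  · congr 1
    apply List.filter_congr
    intro p hp
    rcases (PySem.List.mem_enumerate_iff _ _ _).1 hp with ⟨k, hk, rfl⟩
    have hmem : l[k] ∈ l := List.getElem_mem hk
    rw [PySem.List.index?_append_of_mem [c] hmem]
  · simp only [PySem.List.enumerate_cons, PySem.List.enumerate_nil,
      List.filter_cons, List.filter_nil]
    by_cases h : c ∈ l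
    · have hidx := PySem.List.index?_append_of_mem (l := l) [c] h
      rcases Option.isSome_iff_exists.1 ((PySem.List.index?_isSome_iff l c).2 h) with ⟨k, hk⟩
      rcases PySem.List.getElem_of_index?_eq_some hk with ⟨hklt, -, -⟩
      rw [hidx, hk]
      have hkne : k ≠ l.length := Nat.ne_of_lt hklt
      simp [h, hkne]
    · rw [PySem.List.index?_append_singleton_self l c h]
      simp [h]

lemma dedup_append (l : List Char) (c : Char) :
    PySem.List.dedup (l ++ [c]) =
      if c ∈ l then PySem.List.dedup l else PySem.List.dedup l ++ [c] := by
  have h1 : PySem.List.dedup (l ++ [c]) = PySem.Set.add (PySem.Set.ofList l) c := by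
    rw [PySem.List.dedup_eq_ofList, PySem.Set.ofList_eq_foldl, List.foldl_append]
    rw [← PySem.Set.ofList_eq_foldl]
    rfl
  rw [h1, PySem.List.dedup_eq_ofList]
  unfold PySem.Set.add
  by_cases h : c ∈ l
  · simp [PySem.Set.mem_ofList, h]
  · simp [PySem.Set.mem_ofList, h]

lemma loop_eq (l : List Char) :
    moveDupsLoop l = (PySem.Set.ofList l, PySem.List.dedup l, dupsB l) := by
  induction l using List.reverseRecOn with
  | nil => rfl
  | append_singleton l c ih =>
    unfold moveDupsLoop at ih ⊢
    rw [List.foldl_append, ih]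
    simp only [List.foldl_cons, List.foldl_nil]
    rw [dupsB_append, dedup_append]
    have hof : PySem.Set.ofList (l ++ [c]) = PySem.Set.add (PySem.Set.ofList l) c := by
      rw [PySem.Set.ofList_eq_foldl, List.foldl_append, ← PySem.Set.ofList_eq_foldl]; rfl
    rw [hof]
    unfold PySem.Set.add
    by_cases h : c ∈ l
    · simp [PySem.Set.mem_ofList, h]
    · simp [PySem.Set.mem_ofList, h]

-- ===== VERDICT (by name: the statement is the Claim_ definition above) =====
theorem moveDups_spec : Claim_equal_moveDups := by
  intro s _
  unfold Spec_moveDups moveDups moveDups_alt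
  rw [loop_eq]
  by_cases h : dupsB s.toList = []
  · simp [h]
  · simp [List.isEmpty_iff, h]
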